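-- pv_equiv track=rewrite | github.com/nuarch/EC3-Database-Analysis | ExecutionFlowDiagramGenerator.py | get_procedure_tree_depths
-- ===== SOURCE A (Python) =====
-- from collections import defaultdict
-- from typing import Dict, List, Set, Tuple
--
-- def get_procedure_tree_depths(edges: Dict[str, Set[str]], max_depth: int) -> Dict[str, Dict[int, int]]:
--     """
--     Calculate the tree depth for each procedure and the number of calls made at each depth.
--
--     :param edges: Adjacency list representing the call graph.
--     :param max_depth: The maximum depth to traverse.
--     :return: A dictionary with stored procedures as keys and their depth stats as values.
--              Each depth stat is a dictionary where keys are depths and values are the number of calls at that depth.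
--     """
--     def dfs(node: str, depth: int, depth_stats: Dict[int, int], visited: Set[str]):
--         if depth > max_depth or node in visited:
--             return
--         visited.add(node)
--
--         # Increment the count of calls at the current depth
--         depth_stats[depth] += 1
--
--         # Visit children
--         for child in edges.get(node, []):
--             dfs(child, depth + 1, depth_stats, visited)
--         visited.remove(node)
--
--     depths = {}  # Map: procedure -> depth stats (calls per depth)
--     for procedure in edges.keys():
--         depth_stats = defaultdict(int)  # Map: depth -> call count
--         dfs(procedure, 1, depth_stats, set())  # Start depth at 1
--         depths[procedure] = dict(depth_stats)  # Convert defaultdict to standard dict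
--
--     return depths
-- ===== SOURCE B (Python) =====
-- def get_procedure_tree_depths(edges, max_depth):
--     """Iterative rewrite: an explicit LIFO stack of simple paths replaces the
--     recursive DFS with its shared visited-set backtracking; each popped path is
--     counted at its own length and extended by the children not already on it."""
--     depths = {}
--     for root in edges:
--         stats = {}
--         stack = [(root,)] if max_depth >= 1 else []
--         while stack:
--             path = stack.pop()
--             d = len(path)
--             stats[d] = stats.get(d, 0) + 1
--             if d < max_depth:
--                 for child in reversed(list(edges.get(path[-1], ()))):
--                     if child not in path:
--                         stack.append(path + (child,))
--         depths[root] = stats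
--     return depths
-- ===== Notes on version B (the rewrite author's own statement) =====
-- stated objective: alternative
-- what changed: The recursive DFS with a shared mutable visited set and backtracking is replaced by an iterative worklist loop over an explicit LIFO stack of simple paths: each popped path is counted at its own length and extended by the children not already on it, so there is no recursion and no add/remove bookkeeping.
import Mathlib
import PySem

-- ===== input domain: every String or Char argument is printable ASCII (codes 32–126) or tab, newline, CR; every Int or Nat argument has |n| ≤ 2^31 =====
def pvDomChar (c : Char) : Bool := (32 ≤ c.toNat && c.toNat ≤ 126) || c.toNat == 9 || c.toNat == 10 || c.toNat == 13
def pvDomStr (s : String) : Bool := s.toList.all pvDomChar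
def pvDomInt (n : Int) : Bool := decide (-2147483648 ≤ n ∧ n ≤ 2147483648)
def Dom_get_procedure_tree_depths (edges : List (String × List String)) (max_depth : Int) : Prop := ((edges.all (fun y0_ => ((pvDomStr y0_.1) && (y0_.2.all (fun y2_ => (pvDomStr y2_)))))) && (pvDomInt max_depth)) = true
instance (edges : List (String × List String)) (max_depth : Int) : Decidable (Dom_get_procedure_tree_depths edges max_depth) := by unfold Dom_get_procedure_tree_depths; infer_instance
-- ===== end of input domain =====

-- B replaces A's recursive DFS (shared visited set, backtracking) by an iterative
-- worklist loop over an explicit stack of simple paths; same results, similar cost.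


-- ===== PORT A =====
-- dfs(node, depth, depth_stats, visited): mutation of the two dicts/sets is threaded
-- as a returned pair.  depth_stats[depth] += 1 on a defaultdict(int) is Dict.modify
-- depth 0 (· + 1); edges.get(node, []) is (Dict.mk edges).getD node [].
def dfsA (edges : List (String × List String)) (max_depth : Int) (node : String)
    (depth : Int) (depth_stats : PySem.Dict Int Int) (visited : PySem.Set String) :
    PySem.Dict Int Int × PySem.Set String :=
  if h : max_depth < depth ∨ visited.contains node = true then (depth_stats, visited)
  else
    let visited1 := visited.add node
    let stats1 := depth_stats.modify depth 0 (· + 1)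
    let r := ((PySem.Dict.mk edges).getD node []).foldl
      (fun acc child => dfsA edges max_depth child (depth + 1) acc.1 acc.2) (stats1, visited1)
    -- visited.remove(node): KeyError (the none branch) is unreachable, node was added above
    match PySem.Set.remove? r.2 node with
    | some v => (r.1, v)
    | none => (r.1, r.2)
termination_by (max_depth + 1 - depth).toNat
decreasing_by
  rcases not_or.mp h with ⟨h1, -⟩
  omega

def get_procedure_tree_depths (edges : List (String × List String)) (max_depth : Int) :
    List (String × List (Int × Int)) :=
  ((PySem.Dict.mk edges).keys.foldl
    (fun depths procedure =>
      depths.insert procedure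
        (dfsA edges max_depth procedure 1 PySem.Dict.empty PySem.Set.empty).1.items)
    PySem.Dict.empty).items

-- ===== PORT B =====
-- Termination apparatus for the worklist loop (not part of the algorithm): a frame
-- holding path p weighs (K+1)^(max_depth - len p), K bounding every child-list length.
def childBound (edges : List (String × List String)) : Nat :=
  edges.foldl (fun m p => max m p.2.length) 0

def pathWeight (max_depth : Int) (K : Nat) (path : List String) : Nat :=
  (K + 1) ^ (max_depth - (path.length : Int)).toNat

theorem seed_le_foldl_max (edges : List (String × List String)) (a : Nat) :
    a ≤ edges.foldl (fun m p => max m p.2.length) a := by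
  induction edges generalizing a with
  | nil => exact Nat.le_refl a
  | cons p es ih =>
      exact Nat.le_trans (Nat.le_max_left a p.2.length) (ih (max a p.2.length))

theorem le_childBound_aux (edges : List (String × List String)) (a : Nat) (node : String) :
    ((PySem.Dict.mk edges).getD node []).length ≤ edges.foldl (fun m p => max m p.2.length) a := by
  induction edges generalizing a with
  | nil => simp [PySem.Dict.getD, PySem.Dict.get?]
  | cons p es ih =>
      simp only [List.foldl_cons]
      by_cases hk : (p.1 == node) = true
      · have h1 : ((PySem.Dict.mk (p :: es)).getD node []) = p.2 := by
          simp [PySem.Dict.getD, PySem.Dict.get?, List.find?, hk]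
        rw [h1]
        exact Nat.le_trans (Nat.le_max_right a p.2.length)
          (seed_le_foldl_max es (max a p.2.length))
      · have h1 : ((PySem.Dict.mk (p :: es)).getD node []) = ((PySem.Dict.mk es).getD node []) := by
          simp [PySem.Dict.getD, PySem.Dict.get?, List.find?, hk]
        rw [h1]
        exact ih (max a p.2.length)

theorem pvPushSum (max_depth : Int) (K : Nat) (path : List String)
    (cs : List String) (rest : List (List String)) :
    (((cs.foldl (fun st c => if path.contains c then st else (path ++ [c]) :: st) rest)).map
        (pathWeight max_depth K)).sum
      ≤ ((rest.map (pathWeight max_depth K)).sum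
          + cs.length * (K + 1) ^ (max_depth - ((path.length : Int) + 1)).toNat) := by
  induction cs generalizing rest with
  | nil => simp
  | cons c cs ih =>
      simp only [List.foldl_cons, List.length_cons]
      refine Nat.le_trans (ih (if path.contains c then rest else (path ++ [c]) :: rest)) ?_
      rw [Nat.succ_mul]
      have hw : pathWeight max_depth K (path ++ [c])
          = (K + 1) ^ (max_depth - ((path.length : Int) + 1)).toNat := by
        simp [pathWeight]
      cases hc : path.contains c
      · simp only [hc, Bool.false_eq_true, if_false, List.map_cons, List.sum_cons, hw]
        omega
      · simp only [hc, if_true]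
        omega

theorem pvPushDecreasing (edges : List (String × List String)) (max_depth : Int)
    (path : List String) (rest : List (List String)) (tail : String)
    (h : (path.length : Int) < max_depth) :
    ((((PySem.Dict.mk edges).getD tail []).reverse.foldl
        (fun st child => if path.contains child then st else (path ++ [child]) :: st) rest).map
          (pathWeight max_depth (childBound edges))).sum
      < (((path :: rest).map (pathWeight max_depth (childBound edges))).sum) := by
  have hK : (((PySem.Dict.mk edges).getD tail []).reverse).length ≤ childBound edges := by
    rw [List.length_reverse]
    exact le_childBound_aux edges 0 tail
  refine Nat.lt_of_le_of_lt
    (pvPushSum max_depth (childBound edges) path (((PySem.Dict.mk edges).getD tail []).reverse) rest) ?_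
  simp only [List.map_cons, List.sum_cons]
  have hr : (max_depth - (path.length : Int)).toNat
      = (max_depth - ((path.length : Int) + 1)).toNat + 1 := by omega
  have hpos : 0 < (childBound edges + 1) ^ (max_depth - ((path.length : Int) + 1)).toNat :=
    pow_pos (Nat.succ_pos _) _
  have : (((PySem.Dict.mk edges).getD tail []).reverse).length
        * (childBound edges + 1) ^ (max_depth - ((path.length : Int) + 1)).toNat
      < pathWeight max_depth (childBound edges) path := by
    calc _ ≤ childBound edges * (childBound edges + 1) ^ (max_depth - ((path.length : Int) + 1)).toNat :=
          Nat.mul_le_mul_right _ hK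
      _ < (childBound edges + 1) * (childBound edges + 1) ^ (max_depth - ((path.length : Int) + 1)).toNat :=
          (Nat.mul_lt_mul_right hpos).mpr (Nat.lt_succ_self _)
      _ = pathWeight max_depth (childBound edges) path := by
          rw [pathWeight, hr, pow_succ, Nat.mul_comm]
  omega

theorem pvPopDecreasing (max_depth : Int) (K : Nat) (path : List String)
    (rest : List (List String)) :
    ((rest.map (pathWeight max_depth K)).sum)
      < (((path :: rest).map (pathWeight max_depth K)).sum) := by
  simp only [List.map_cons, List.sum_cons]
  exact Nat.lt_add_of_pos_left (pow_pos (Nat.succ_pos K) _)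

-- the while loop over the stack of simple paths
def runB (edges : List (String × List String)) (max_depth : Int)
    (stack : List (List String)) (stats : PySem.Dict Int Int) : PySem.Dict Int Int :=
  match stack with
  | [] => stats
  | path :: rest =>
    let stats1 := stats.insert (path.length : Int) (stats.getD (path.length : Int) 0 + 1)
    if h : (path.length : Int) < max_depth then
      -- path[-1]: the IndexError branch (none) is unreachable, frames are never empty
      match PySem.List.pyGet? path (-1) with
      | none => runB edges max_depth rest stats1
      | some tail =>
        runB edges max_depth
          (((PySem.Dict.mk edges).getD tail []).reverse.foldl
            (fun st child => if path.contains child then st else (path ++ [child]) :: st) rest)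
          stats1
    else
      runB edges max_depth rest stats1
termination_by ((stack.map (pathWeight max_depth (childBound edges))).sum)
decreasing_by
  · exact pvPopDecreasing max_depth (childBound edges) path rest
  · exact pvPushDecreasing edges max_depth path rest tail h
  · exact pvPopDecreasing max_depth (childBound edges) path rest

def get_procedure_tree_depths_alt (edges : List (String × List String)) (max_depth : Int) :
    List (String × List (Int × Int)) :=
  ((PySem.Dict.mk edges).keys.foldl
    (fun depths root =>
      depths.insert root
        (runB edges max_depth (if 1 ≤ max_depth then [[root]] else []) PySem.Dict.empty).items)
    PySem.Dict.empty).items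

-- ===== PRECONDITION & SPEC =====
def Spec_get_procedure_tree_depths (edges : List (String × List String)) (max_depth : Int) (out : List (String × List (Int × Int))) : Prop := out = get_procedure_tree_depths_alt edges max_depth
instance (edges : List (String × List String)) (max_depth : Int) (out : List (String × List (Int × Int))) : Decidable (Spec_get_procedure_tree_depths edges max_depth out) := by unfold Spec_get_procedure_tree_depths; infer_instance

-- ===== CLAIM (what is proved, stated in full; the proofs are below) =====
def Claim_equal_get_procedure_tree_depths : Prop := ∀ (edges : List (String × List String)) (max_depth : Int), Dom_get_procedure_tree_depths edges max_depth → Spec_get_procedure_tree_depths edges max_depth (get_procedure_tree_depths edges max_depth)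

-- ===== LEMMAS AND PROOFS =====

-- dfs leaves the visited set exactly as it found it (add … then remove …).
theorem dfsA_snd (edges : List (String × List String)) (max_depth : Int) :
    ∀ (fuel : Nat) (node : String) (depth : Int) (stats : PySem.Dict Int Int)
      (vis : PySem.Set String), (max_depth + 1 - depth).toNat ≤ fuel →
      (dfsA edges max_depth node depth stats vis).2 = vis := by
  intro fuel
  induction fuel with
  | zero =>
      intro node depth stats vis hfuel
      rw [dfsA, dif_pos (Or.inl (by omega))]
  | succ fuel ih =>
      intro node depth stats vis hfuel
      rw [dfsA]
      by_cases hg : max_depth < depth ∨ vis.contains node = true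
      · rw [dif_pos hg]
      · rw [dif_neg hg]
        rcases not_or.mp hg with ⟨hd, hc⟩
        have hnm : node ∉ vis := by
          intro hmem
          exact hc (by simpa [PySem.Set.contains, List.contains_iff_mem] using hmem)
        have hfold : ∀ (cs : List String) (st : PySem.Dict Int Int × PySem.Set String),
            st.2 = vis.add node →
            ((cs.foldl (fun acc child => dfsA edges max_depth child (depth + 1) acc.1 acc.2) st)).2
              = vis.add node := by
          intro cs
          induction cs with
          | nil => intro st h; exact h
          | cons c cs ihc =>
              intro st h
              simp only [List.foldl_cons]
              exact ihc _ (by rw [ih c (depth + 1) st.1 st.2 (by omega), h])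
        simp only []
        rw [hfold _ _ rfl]
        have hadd : PySem.Set.add vis node = vis ++ [node] := by
          simp [PySem.Set.add, PySem.Set.contains]
          intro hmem
          exact absurd hmem hnm
        rw [hadd]
        have hcontains : PySem.Set.contains (vis ++ [node]) node = true := by
          simp [PySem.Set.contains]
        simp only [PySem.Set.remove?, hcontains, if_true]
        simp [PySem.Set.discard, List.filter_append, List.filter_eq_self]
        intro x hx hxeq
        exact hnm (hxeq ▸ hx)

-- the reversed-children push loop builds the frames of the not-yet-visited children, in order
theorem pushFrames (path : List String) (cs : List String) (rest : List (List String)) :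
    cs.reverse.foldl (fun st c => if path.contains c then st else (path ++ [c]) :: st) rest
      = ((cs.filter (fun c => !path.contains c)).map (fun c => path ++ [c])) ++ rest := by
  rw [List.foldl_reverse]
  induction cs with
  | nil => simp
  | cons c cs ih =>
      simp only [List.foldr_cons, List.filter_cons, ih]
      cases hc : path.contains c
      · simp [hc]
      · simp [hc]

-- the first component of a non-skipped dfs call, with the let/match chain resolved
theorem dfsA_fst (edges : List (String × List String)) (max_depth : Int) (n : String)
    (d : Int) (stats : PySem.Dict Int Int) (vis : PySem.Set String)
    (hguard : ¬(max_depth < d ∨ vis.contains n = true)) :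
    (dfsA edges max_depth n d stats vis).1
      = (((PySem.Dict.mk edges).getD n []).foldl
          (fun acc child => dfsA edges max_depth child (d + 1) acc.1 acc.2)
          (stats.insert d (stats.getD d 0 + 1), vis.add n)).1 := by
  rw [dfsA, dif_neg hguard]
  simp only [PySem.Dict.modify]
  split <;> rfl

-- main simulation: popping one frame of the stack machine performs one dfs call
theorem simB (edges : List (String × List String)) (max_depth : Int) :
    ∀ (fuel : Nat) (path : List String) (rest : List (List String))
      (stats : PySem.Dict Int Int) (hne : path ≠ []) (_ : path.Nodup)
      (_ : (path.length : Int) ≤ max_depth) (_ : (max_depth + 1 - path.length).toNat ≤ fuel),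
      runB edges max_depth (path :: rest) stats
        = runB edges max_depth rest
            (dfsA edges max_depth (path.getLast hne) (path.length : Int) stats path.dropLast).1 := by
  intro fuel
  induction fuel with
  | zero =>
      intro path rest stats hne hnd hlen hfuel
      exact absurd hfuel (by omega)
  | succ fuel ih =>
      intro path rest stats hne hnd hlen hfuel
      have hsplit : path.dropLast ++ [path.getLast hne] = path := List.dropLast_append_getLast hne
      have hnm : path.getLast hne ∉ path.dropLast := by
        have hnd' := hnd
        rw [← hsplit] at hnd'
        intro hmem
        exact ((List.nodup_append).mp hnd').2.2 _ hmem _ (by simp) rfl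
      have hguard : ¬(max_depth < (path.length : Int)
          ∨ PySem.Set.contains path.dropLast (path.getLast hne) = true) := by
        rintro (h | h)
        · omega
        · exact hnm (by simpa [PySem.Set.contains, List.contains_iff_mem] using h)
      have hadd : PySem.Set.add path.dropLast (path.getLast hne) = path := by
        rw [PySem.Set.add, if_neg, hsplit]
        simpa [PySem.Set.contains, List.contains_iff_mem] using hnm
      rw [runB, dfsA_fst edges max_depth _ _ _ _ hguard, hadd]
      by_cases hlt : (path.length : Int) < max_depth
      · rw [dif_pos hlt]
        have hget : PySem.List.pyGet? path (-1) = some (path.getLast hne) := by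
          rw [PySem.List.pyGet?_neg_one]
          exact List.getLast?_eq_some_getLast hne
        rw [hget]
        dsimp only
        rw [pushFrames path ((PySem.Dict.mk edges).getD (path.getLast hne) []) rest]
        -- peel the valid children one frame at a time; each frame is one recursive dfs call
        have hinner : ∀ (cs : List String) (st : PySem.Dict Int Int),
            runB edges max_depth
              (((cs.filter (fun c => !path.contains c)).map (fun c => path ++ [c])) ++ rest) st
            = runB edges max_depth rest
                ((cs.foldl
                  (fun acc child => dfsA edges max_depth child ((path.length : Int) + 1) acc.1 acc.2)
                  (st, (path : PySem.Set String)))).1 := by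
          intro cs
          induction cs with
          | nil => simp
          | cons c cs ihc =>
              intro st
              simp only [List.foldl_cons, List.filter_cons]
              cases hc : path.contains c
              · have hcm : c ∉ path := by
                  simpa [List.contains_iff_mem] using hc
                simp only [Bool.not_false, if_true, List.map_cons, List.cons_append]
                rw [ih (path ++ [c]) _ st (by simp) (by
                      simp [List.nodup_append, hnd]
                      intro a ha hac
                      exact absurd (hac ▸ ha) hcm)
                    (by simp only [List.length_append, List.length_cons, List.length_nil]; push_cast; omega)
                    (by simp only [List.length_append, List.length_cons, List.length_nil]; push_cast; omega)]
                have hlast : (path ++ [c]).getLast (by simp) = c := List.getLast_concat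
                have hdrop : (path ++ [c]).dropLast = path := List.dropLast_concat
                have hlen1 : (((path ++ [c]).length : Int)) = (path.length : Int) + 1 := by
                  simp only [List.length_append, List.length_cons, List.length_nil]
                  push_cast; ring
                rw [hlast, hdrop, hlen1]
                have hsnd : (dfsA edges max_depth c ((path.length : Int) + 1) st path).2
                    = (path : PySem.Set String) :=
                  dfsA_snd edges max_depth fuel c _ st path (by omega)
                rw [ihc ((dfsA edges max_depth c ((path.length : Int) + 1) st path).1)]
                have hpair : dfsA edges max_depth c ((path.length : Int) + 1) st path
                    = ((dfsA edges max_depth c ((path.length : Int) + 1) st path).1,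
                       (path : PySem.Set String)) := Prod.ext_iff.mpr ⟨rfl, hsnd⟩
                rw [hpair]
              · simp only [Bool.not_true, Bool.false_eq_true, if_false]
                rw [ihc st]
                have hskip : dfsA edges max_depth c ((path.length : Int) + 1) st path
                    = (st, (path : PySem.Set String)) := by
                  rw [dfsA, dif_pos (Or.inr (show PySem.Set.contains path c = true from hc))]
                rw [hskip]
        exact hinner _ _
      · rw [dif_neg hlt]
        have hid : ∀ (cs : List String) (st : PySem.Dict Int Int × PySem.Set String),
            cs.foldl (fun acc child => dfsA edges max_depth child ((path.length : Int) + 1) acc.1 acc.2) st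
              = st := by
          intro cs
          induction cs with
          | nil => intro st; rfl
          | cons c cs ihc =>
              intro st
              simp only [List.foldl_cons]
              rw [dfsA, dif_pos (Or.inl (by omega))]
              exact ihc st
        rw [hid]

-- ===== VERDICT (by name: the statement is the Claim_ definition above) =====
theorem get_procedure_tree_depths_spec : Claim_equal_get_procedure_tree_depths := by
  intro edges max_depth _
  unfold Spec_get_procedure_tree_depths
  unfold get_procedure_tree_depths get_procedure_tree_depths_alt
  have hrun0 : ∀ st : PySem.Dict Int Int, runB edges max_depth [] st = st := fun st => by
    rw [runB]
  have key : ∀ root : String,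
      (dfsA edges max_depth root 1 PySem.Dict.empty PySem.Set.empty).1.items
        = (runB edges max_depth (if 1 ≤ max_depth then [[root]] else [])
            PySem.Dict.empty).items := by
    intro root
    by_cases hmd : 1 ≤ max_depth
    · rw [if_pos hmd]
      have hs := simB edges max_depth ((max_depth + 1 - (([root].length : Nat) : Int)).toNat)
        [root] [] PySem.Dict.empty (by simp) (List.nodup_singleton root)
        (by simpa using hmd) (Nat.le_refl _)
      rw [hrun0] at hs
      simp only [List.getLast_singleton, List.length_singleton, List.dropLast_singleton,
        Nat.cast_one] at hs
      rw [hs]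
      rfl
    · rw [if_neg hmd]
      rw [hrun0, dfsA, dif_pos (Or.inl (by omega))]
  have hfun : (fun (depths : PySem.Dict String (List (Int × Int))) procedure =>
        depths.insert procedure
          (dfsA edges max_depth procedure 1 PySem.Dict.empty PySem.Set.empty).1.items)
      = (fun depths root =>
        depths.insert root
          (runB edges max_depth (if 1 ≤ max_depth then [[root]] else [])
            PySem.Dict.empty).items) := by
    funext depths root
    rw [key root]
  rw [hfun]
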